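-- pv_equiv track=rewrite | github.com/pypi-data/pypi-mirror-361 | packages/coder-mcp/coder_mcp-1.0.1-py3-none-any.whl/coder_mcp/ai/enhancers/dependency_enhancer.py | _extract_detailed_vulnerabilities
-- ===== SOURCE A (Python) =====
-- from typing import Any, Dict, List, Optional
--
-- def _extract_detailed_vulnerabilities(ai_response: str) -> List[Dict[str, Any]]:
--     """Extract detailed vulnerability information from AI response"""
--     vulnerabilities = []
--     lines = ai_response.split("\n")
--     current_vuln: Dict[str, Any] = {}
--
--     for line in lines:
--         line = line.strip()
--         if "cve" in line.lower() or "vulnerability" in line.lower():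
--             if current_vuln:
--                 vulnerabilities.append(current_vuln)
--             current_vuln = {
--                 "id": line,
--                 "severity": "medium",
--                 "package": "unknown",
--                 "description": line,
--             }
--         elif current_vuln and "severity" in line.lower():
--             severity_words = ["critical", "high", "medium", "low"]
--             for severity in severity_words:
--                 if severity in line.lower():
--                     current_vuln["severity"] = severity
--                     break
--
--     if current_vuln:
--         vulnerabilities.append(current_vuln)
--
--     return vulnerabilities
-- ===== SOURCE B (Python) =====
-- def _extract_detailed_vulnerabilities(ai_response):
--     """Group lines under headers first, then map each group to a record."""
--     lines = [ln.strip() for ln in ai_response.split("\n")]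
--
--     def is_header(ln):
--         low = ln.lower()
--         return "cve" in low or "vulnerability" in low
--
--     # pass 1: group lines under their header, dropping lines before the first header
--     groups = []
--     for ln in lines:
--         if is_header(ln):
--             groups.append((ln, []))
--         elif groups:
--             groups[-1][1].append(ln)
--
--     # pass 2: one record per group; last severity-line wins, first matching word wins
--     result = []
--     for header, rest in groups:
--         sev = "medium"
--         for ln in rest:
--             low = ln.lower()
--             if "severity" in low:
--                 for w in ("critical", "high", "medium", "low"):
--                     if w in low:
--                         sev = w
--                         break
--         result.append({"id": header, "severity": sev, "package": "unknown", "description": header})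
--     return result
-- ===== Notes on version B (the rewrite author's own statement) =====
-- stated objective: alternative
-- what changed: Replaces A's single stateful parse (mutable current record updated in place) by two passes: first group stripped lines under their header lines, then map each group independently to its record with a severity fold over the group's body.
import Mathlib
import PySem

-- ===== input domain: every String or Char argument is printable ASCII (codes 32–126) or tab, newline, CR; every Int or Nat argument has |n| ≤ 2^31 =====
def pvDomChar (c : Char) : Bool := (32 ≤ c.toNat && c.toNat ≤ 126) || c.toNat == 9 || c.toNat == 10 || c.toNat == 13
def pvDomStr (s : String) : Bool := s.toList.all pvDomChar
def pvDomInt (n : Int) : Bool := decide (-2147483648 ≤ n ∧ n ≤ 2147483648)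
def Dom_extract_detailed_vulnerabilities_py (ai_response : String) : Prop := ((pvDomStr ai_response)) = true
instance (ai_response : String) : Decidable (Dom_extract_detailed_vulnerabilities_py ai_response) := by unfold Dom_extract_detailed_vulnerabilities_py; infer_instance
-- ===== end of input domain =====

-- B re-organizes A's single stateful parse as group-then-map (alternative decomposition, same cost); return values proved equal.

-- ===== PORT A =====
-- A's loop body on the already-stripped line (the strip itself happens in pvStepA below, as in A's loop).
def pvStepACore (st : List (PySem.Dict String String) × PySem.Dict String String) (line : String) :
    List (PySem.Dict String String) × PySem.Dict String String :=
  if PySem.Str.isIn "cve" (PySem.Str.lower line) || PySem.Str.isIn "vulnerability" (PySem.Str.lower line) then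
    ((if st.2.size ≠ 0 then st.1 ++ [st.2] else st.1),
     ((((PySem.Dict.empty.insert "id" line).insert "severity" "medium").insert
          "package" "unknown").insert "description" line))
  else if st.2.size ≠ 0 ∧ PySem.Str.isIn "severity" (PySem.Str.lower line) then
    (st.1,
     -- for severity in severity_words: if severity in line.lower(): set; break
     match (["critical", "high", "medium", "low"] : List String).find?
         (fun w => PySem.Str.isIn w (PySem.Str.lower line)) with
     | some w => st.2.insert "severity" w
     | none => st.2)
  else st

def pvStepA (st : List (PySem.Dict String String) × PySem.Dict String String) (rawLine : String) :
    List (PySem.Dict String String) × PySem.Dict String String :=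
  pvStepACore st (PySem.Str.strip rawLine)

def extract_detailed_vulnerabilities_py (ai_response : String) : List (List (String × String)) :=
  let lines := (PySem.Str.split? ai_response "\n").getD []   -- s.split("\n"): sep ≠ "", never raises
  let r := lines.foldl pvStepA ([], PySem.Dict.empty)
  (if r.2.size ≠ 0 then r.1 ++ [r.2] else r.1).map PySem.Dict.items

-- ===== PORT B =====
def pvIsHeaderB (line : String) : Bool :=
  PySem.Str.isIn "cve" (PySem.Str.lower line) || PySem.Str.isIn "vulnerability" (PySem.Str.lower line)

-- groups[-1][1].append(ln)
def pvAppendLastB (gs : List (String × List String)) (line : String) : List (String × List String) :=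
  match gs with
  | [] => []
  | [g] => [(g.1, g.2 ++ [line])]
  | g :: g' :: rest => g :: pvAppendLastB (g' :: rest) line

def pvAddLineB (gs : List (String × List String)) (line : String) : List (String × List String) :=
  if pvIsHeaderB line then gs ++ [(line, [])]
  else if gs.isEmpty then gs
  else pvAppendLastB gs line

def pvSevStepB (s : String) (line : String) : String :=
  if PySem.Str.isIn "severity" (PySem.Str.lower line) then
    match (["critical", "high", "medium", "low"] : List String).find?
        (fun w => PySem.Str.isIn w (PySem.Str.lower line)) with
    | some w => w
    | none => s
  else s

def pvMkB (g : String × List String) : List (String × String) :=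
  [("id", g.1), ("severity", g.2.foldl pvSevStepB "medium"),
   ("package", "unknown"), ("description", g.1)]

def extract_detailed_vulnerabilities_py_alt (ai_response : String) : List (List (String × String)) :=
  let lines := ((PySem.Str.split? ai_response "\n").getD []).map PySem.Str.strip
  (lines.foldl pvAddLineB []).map pvMkB

-- ===== PRECONDITION & SPEC =====
def Spec_extract_detailed_vulnerabilities_py (ai_response : String) (out : List (List (String × String))) : Prop := out = extract_detailed_vulnerabilities_py_alt ai_response
instance (ai_response : String) (out : List (List (String × String))) : Decidable (Spec_extract_detailed_vulnerabilities_py ai_response out) := by unfold Spec_extract_detailed_vulnerabilities_py; infer_instance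

-- ===== CLAIM (what is proved, stated in full; the proofs are below) =====
def Claim_equal_extract_detailed_vulnerabilities_py : Prop := ∀ (ai_response : String), Dom_extract_detailed_vulnerabilities_py ai_response → Spec_extract_detailed_vulnerabilities_py ai_response (extract_detailed_vulnerabilities_py ai_response)

-- ===== LEMMAS AND PROOFS =====

-- A's current record with header h and severity s, as it sits in A's state.
def pvRecord (h s : String) : PySem.Dict String String :=
  ((((PySem.Dict.empty.insert "id" h).insert "severity" "medium").insert
      "package" "unknown").insert "description" h).insert "severity" s

lemma pvRecord_items (h s : String) :
    (pvRecord h s).items =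
      [("id", h), ("severity", s), ("package", "unknown"), ("description", h)] := by
  simp [pvRecord, PySem.Dict.insert, PySem.Dict.empty]

lemma pvRecord_size (h s : String) : (pvRecord h s).size ≠ 0 := by
  simp [pvRecord, PySem.Dict.insert, PySem.Dict.empty, PySem.Dict.size]

lemma pvRecord_insert (h s w : String) :
    (pvRecord h s).insert "severity" w = pvRecord h w := by
  simp [pvRecord, PySem.Dict.insert, PySem.Dict.empty]

lemma pvRecord_medium (h : String) :
    ((((PySem.Dict.empty.insert "id" h).insert "severity" "medium").insert
        "package" "unknown").insert "description" h) = pvRecord h "medium" := by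
  simp [pvRecord, PySem.Dict.insert, PySem.Dict.empty]

def pvFinalize (r : List (PySem.Dict String String) × PySem.Dict String String) :
    List (List (String × String)) :=
  (if r.2.size ≠ 0 then r.1 ++ [r.2] else r.1).map PySem.Dict.items

lemma pvAppendLastB_append (gs1 gs2 : List (String × List String)) (ln : String)
    (h : gs2 ≠ []) : pvAppendLastB (gs1 ++ gs2) ln = gs1 ++ pvAppendLastB gs2 ln := by
  induction gs1 with
  | nil => rfl
  | cons g gs1 ih =>
      cases gs1 with
      | nil =>
          cases gs2 with
          | nil => exact absurd rfl h
          | cons b bs => rfl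
      | cons g' gs1' =>
          simp only [List.cons_append, pvAppendLastB]
          rw [← List.cons_append, ih]
          simp

lemma pvAddLineB_ne_nil (gs : List (String × List String)) (ln : String) (h : gs ≠ []) :
    pvAddLineB gs ln ≠ [] := by
  unfold pvAddLineB
  split_ifs with h1 h2
  · simp
  · exact h
  · cases gs with
    | nil => exact absurd rfl h
    | cons g gs' => cases gs' <;> simp [pvAppendLastB]

lemma pvAddLineB_append (gs1 gs2 : List (String × List String)) (ln : String)
    (h : gs2 ≠ []) : pvAddLineB (gs1 ++ gs2) ln = gs1 ++ pvAddLineB gs2 ln := by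
  have hne2 : gs2.isEmpty = false := by simpa [List.isEmpty_iff] using h
  have hne : (gs1 ++ gs2).isEmpty = false := by
    cases gs2 with
    | nil => exact absurd rfl h
    | cons a l => simp
  unfold pvAddLineB
  rw [hne, hne2]
  by_cases hh : pvIsHeaderB ln = true
  · rw [if_pos hh, if_pos hh]
    simp
  · rw [if_neg hh, if_neg hh]
    simp only [Bool.false_eq_true, if_false]
    exact pvAppendLastB_append gs1 gs2 ln h

-- split lemma for the whole fold
lemma pvFoldl_addLineB_split (lines : List String) (gs1 gs2 : List (String × List String))
    (h : gs2 ≠ []) :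
    lines.foldl pvAddLineB (gs1 ++ gs2) = gs1 ++ lines.foldl pvAddLineB gs2 := by
  induction lines generalizing gs2 with
  | nil => rfl
  | cons ln lines ih =>
      simp only [List.foldl_cons]
      rw [pvAddLineB_append gs1 gs2 ln h]
      exact ih _ (pvAddLineB_ne_nil gs2 ln h)

-- the non-header step of A keeps the record shape and performs exactly B's severity step
lemma pvStepACore_nonheader (acc : List (PySem.Dict String String)) (h s ln : String)
    (hh : pvIsHeaderB ln = false) :
    pvStepACore (acc, pvRecord h s) ln = (acc, pvRecord h (pvSevStepB s ln)) := by
  unfold pvStepACore pvSevStepB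
  unfold pvIsHeaderB at hh
  rw [hh]
  simp only [Bool.false_eq_true, if_false]
  by_cases hsev : PySem.Str.isIn "severity" (PySem.Str.lower ln) = true
  · rw [if_pos ⟨pvRecord_size h s, hsev⟩, if_pos hsev]
    cases hf : (["critical", "high", "medium", "low"] : List String).find?
        (fun w => PySem.Str.isIn w (PySem.Str.lower ln)) with
    | none => simp
    | some w => simp [pvRecord_insert]
  · have : ¬ ((pvRecord h s).size ≠ 0 ∧ PySem.Str.isIn "severity" (PySem.Str.lower ln) = true) := by
      intro ⟨_, hc⟩; exact hsev hc
    rw [if_neg this, if_neg hsev]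

lemma pvStepACore_header (acc : List (PySem.Dict String String)) (cur : PySem.Dict String String)
    (ln : String) (hh : pvIsHeaderB ln = true) :
    pvStepACore (acc, cur) ln =
      ((if cur.size ≠ 0 then acc ++ [cur] else acc), pvRecord ln "medium") := by
  unfold pvStepACore
  unfold pvIsHeaderB at hh
  rw [if_pos hh, pvRecord_medium]

lemma pvSev_append (rest : List String) (ln : String) :
    (rest ++ [ln]).foldl pvSevStepB "medium" = pvSevStepB (rest.foldl pvSevStepB "medium") ln := by
  simp

-- main invariant: from a live record, A's remaining fold equals B's grouping of the remaining lines
lemma pvMain (lines : List String) (acc : List (PySem.Dict String String)) (h : String)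
    (rest : List String) :
    pvFinalize (lines.foldl pvStepACore (acc, pvRecord h (rest.foldl pvSevStepB "medium")))
      = acc.map PySem.Dict.items ++ (lines.foldl pvAddLineB [(h, rest)]).map pvMkB := by
  induction lines generalizing acc h rest with
  | nil =>
      simp [pvFinalize, pvRecord_size, pvRecord_items, pvMkB]
  | cons ln lines ih =>
      simp only [List.foldl_cons]
      by_cases hh : pvIsHeaderB ln = true
      · rw [pvStepACore_header _ _ _ hh, if_pos (pvRecord_size _ _)]
        have hB : pvAddLineB [(h, rest)] ln = [(h, rest)] ++ [(ln, [])] := by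
          unfold pvAddLineB; rw [if_pos hh]
        rw [hB, pvFoldl_addLineB_split lines [(h, rest)] [(ln, [])] (by simp)]
        have := ih (acc ++ [pvRecord h (rest.foldl pvSevStepB "medium")]) ln []
        simp only [List.foldl_nil] at this
        rw [this]
        simp [pvRecord_items, pvMkB]
      · rw [pvStepACore_nonheader _ _ _ _ (by simpa using hh)]
        have hB : pvAddLineB [(h, rest)] ln = [(h, rest ++ [ln])] := by
          unfold pvAddLineB
          rw [if_neg (by simpa using hh)]
          simp [pvAppendLastB]
        rw [hB, ← pvSev_append]
        exact ih acc h (rest ++ [ln])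

lemma pvFront (lines : List String) :
    pvFinalize (lines.foldl pvStepACore ([], PySem.Dict.empty))
      = (lines.foldl pvAddLineB []).map pvMkB := by
  induction lines with
  | nil => simp [pvFinalize, PySem.Dict.empty, PySem.Dict.size]
  | cons ln lines ih =>
      simp only [List.foldl_cons]
      by_cases hh : pvIsHeaderB ln = true
      · rw [pvStepACore_header _ _ _ hh]
        have hB : pvAddLineB [] ln = [(ln, [])] := by
          unfold pvAddLineB; rw [if_pos hh]; rfl
        rw [hB]
        rw [if_neg (by simp [PySem.Dict.empty, PySem.Dict.size])]
        have := pvMain lines [] ln []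
        simpa using this
      · have hA : pvStepACore ([], PySem.Dict.empty) ln = ([], PySem.Dict.empty) := by
          unfold pvStepACore
          unfold pvIsHeaderB at hh
          rw [if_neg (by simpa using hh)]
          rw [if_neg (by simp [PySem.Dict.empty, PySem.Dict.size])]
        have hB : pvAddLineB [] ln = [] := by
          unfold pvAddLineB
          rw [if_neg (by simpa using hh)]
          simp
        rw [hA, hB, ih]

-- ===== VERDICT (by name: the statement is the Claim_ definition above) =====
theorem extract_detailed_vulnerabilities_py_spec : Claim_equal_extract_detailed_vulnerabilities_py := by
  intro ai _
  show extract_detailed_vulnerabilities_py ai = extract_detailed_vulnerabilities_py_alt ai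
  have h := pvFront (((PySem.Str.split? ai "\n").getD []).map PySem.Str.strip)
  rw [List.foldl_map] at h
  exact h
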